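-- pv_equiv track=rewrite | github.com/EncodeGroup/time-window | time_window/helpers.py | gaps_iterator
-- ===== SOURCE A (Python) =====
-- def gaps_iterator(seq):
--     """
--     Iterate on the gaps between elements of the sequence. Each time a new item
--     is requested a tuple with the next two sequential elements is returned.
--
--     Example:
--      [3,4,5,6] -> [(3,4), (4,5), (5,6)]
--     """
--     it = iter(seq)
--     try:
--         previous = next(it)
--     except StopIteration:
--         return
--
--     while True:
--         try:
--             current = next(it)
--             yield (previous, current)
--             previous = current
--         except StopIteration:
--             return
-- ===== SOURCE B (Python) =====
-- def gaps_iterator(seq):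
--     """
--     Iterate on the gaps between elements of the sequence. Each time a new item
--     is requested a tuple with the next two sequential elements is returned.
--
--     Example:
--      [3,4,5,6] -> [(3,4), (4,5), (5,6)]
--     """
--     buf = list(seq)
--     for i in range(1, len(buf)):
--         yield (buf[i - 1], buf[i])
-- ===== Notes on version B (the rewrite author's own statement) =====
-- stated objective: alternative
-- what changed: Instead of a stateful previous/current iterator loop, B first materializes the sequence into a list and then yields index-addressed pairs (buf[i-1], buf[i]) over range(1, len(buf)) - random access over a buffer instead of streaming state.
import Mathlib
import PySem

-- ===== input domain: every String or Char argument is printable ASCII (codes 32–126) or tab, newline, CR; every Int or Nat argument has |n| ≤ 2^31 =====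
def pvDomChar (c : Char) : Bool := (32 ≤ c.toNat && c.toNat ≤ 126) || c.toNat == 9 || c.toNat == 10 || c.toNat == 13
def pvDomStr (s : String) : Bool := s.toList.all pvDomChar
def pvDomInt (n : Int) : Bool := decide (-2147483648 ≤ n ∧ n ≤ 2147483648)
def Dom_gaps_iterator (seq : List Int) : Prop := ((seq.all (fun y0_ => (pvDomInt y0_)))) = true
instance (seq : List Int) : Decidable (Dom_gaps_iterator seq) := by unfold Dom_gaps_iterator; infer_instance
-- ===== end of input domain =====

-- B replaces A's stateful previous/current iterator loop with a buffered, index-addressed pass (pairs (buf[i-1], buf[i]) over range(1, len)); objective: alternative. B materializes generator inputs into a list first (no extra side effect on list inputs).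


-- ===== PORT A =====
-- the while-loop carrying 'previous': structural recursion over the rest of the list
def gapsLoop (previous : Int) (it : List Int) : List (Int × Int) :=
  match it with
  | [] => []
  | current :: rest => (previous, current) :: gapsLoop current rest

def gaps_iterator (seq : List Int) : List (Int × Int) :=
  match seq with
  | [] => []                      -- next(it) raises StopIteration: generator yields nothing
  | previous :: it => gapsLoop previous it

-- ===== PORT B =====
-- buf = list(seq); for i in range(1, len(buf)): yield (buf[i-1], buf[i])
-- indices 1 ≤ i < len are always in range, so pyGetD's default 0 is never used
def gaps_iterator_alt (seq : List Int) : List (Int × Int) :=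
  (PySem.List.pyRange 1 seq.length 1).map
    (fun i => (PySem.List.pyGetD seq (i - 1) 0, PySem.List.pyGetD seq i 0))

-- ===== PRECONDITION & SPEC =====
def Spec_gaps_iterator (seq : List Int) (out : List (Int × Int)) : Prop := out = gaps_iterator_alt seq
instance (seq : List Int) (out : List (Int × Int)) : Decidable (Spec_gaps_iterator seq out) := by unfold Spec_gaps_iterator; infer_instance

-- ===== CLAIM =====
def Claim_equal_gaps_iterator : Prop := ∀ (seq : List Int), Dom_gaps_iterator seq → Spec_gaps_iterator seq (gaps_iterator seq)

-- ===== LEMMAS AND PROOFS =====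
theorem gapsLoop_eq_zip (p : Int) (it : List Int) :
    gapsLoop p it = List.zip (p :: it) it := by
  induction it generalizing p with
  | nil => rfl
  | cons c rest ih => simp [gapsLoop, ih]

theorem alt_eq_zip (seq : List Int) :
    gaps_iterator_alt seq = List.zip seq seq.tail := by
  unfold gaps_iterator_alt
  apply List.ext_getElem
  · simp [PySem.List.length_pyRange_one, List.length_zip]
  · intro k h1 h2
    have hk : k < (((seq.length : Int)) - 1).toNat := by
      simpa [PySem.List.length_pyRange_one] using h1
    have hk' : k + 1 < seq.length := by omega
    simp only [List.getElem_map, PySem.List.getElem_pyRange_one, List.getElem_zip]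
    have e1 : PySem.List.pyGetD seq ((1 : Int) + k - 1) 0 = seq[k] := by
      have := PySem.List.pyGetD_eq_getElem (xs := seq) (i := ((1 : Int) + k - 1)) (d := 0)
        (by omega) (by push_cast; omega)
      simpa using this
    have e2 : PySem.List.pyGetD seq ((1 : Int) + k) 0 = seq[k + 1] := by
      rw [PySem.List.pyGetD_eq_getElem (xs := seq) (i := (1 : Int) + k) (d := 0) (by omega) (by push_cast; omega)]
      congr 1
      omega
    rw [e1, e2]
    simp [List.getElem_tail]

-- ===== VERDICT =====
theorem gaps_iterator_spec : Claim_equal_gaps_iterator := by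
  intro seq _
  unfold Spec_gaps_iterator
  rw [alt_eq_zip]
  cases seq with
  | nil => rfl
  | cons p it => simp [gaps_iterator, gapsLoop_eq_zip]
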